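-- pv_equiv track=rewrite | github.com/Melly-999/alpha_data_scraper_ai | news_sentiment.py | _analyze_sentiment_newsapi
-- ===== SOURCE A (Python) =====
-- def _analyze_sentiment_newsapi(text: str) -> str:
--     """Simple sentiment analysis using keyword matching."""
--     positive_keywords = [
--         "growth",
--         "gain",
--         "strong",
--         "beat",
--         "above",
--         "rally",
--         "surge",
--         "bull",
--     ]
--     negative_keywords = [
--         "fall",
--         "decline",
--         "weakness",
--         "miss",
--         "below",
--         "crash",
--         "bear",
--         "drop",
--     ]
--
--     text_lower = text.lower()
--
--     pos_count = sum(1 for kw in positive_keywords if kw in text_lower)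
--     neg_count = sum(1 for kw in negative_keywords if kw in text_lower)
--
--     if pos_count > neg_count:
--         return "POSITIVE"
--     elif neg_count > pos_count:
--         return "NEGATIVE"
--     return "NEUTRAL"
-- ===== SOURCE B (Python) =====
-- def _analyze_sentiment_newsapi(text: str) -> str:
--     """Single left-to-right scan of the text (naive multi-pattern matching with
--     first-character dispatch), instead of one substring test per keyword."""
--     table = {
--         "g": [("growth", 1), ("gain", 1)],
--         "s": [("strong", 1), ("surge", 1)],
--         "b": [("beat", 1), ("bull", 1), ("below", -1), ("bear", -1)],
--         "a": [("above", 1)],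
--         "r": [("rally", 1)],
--         "f": [("fall", -1)],
--         "d": [("decline", -1), ("drop", -1)],
--         "w": [("weakness", -1)],
--         "m": [("miss", -1)],
--         "c": [("crash", -1)],
--     }
--     t = text.lower()
--     seen = set()
--     score = 0
--     for i, c in enumerate(t):
--         for kw, w in table.get(c, []):
--             if kw not in seen and t.startswith(kw, i):
--                 seen.add(kw)
--                 score += w
--     return "POSITIVE" if score > 0 else "NEGATIVE" if score < 0 else "NEUTRAL"
-- ===== Notes on version B (the rewrite author's own statement) =====
-- stated objective: alternative
-- what changed: Replaced the per-keyword substring-membership passes by a single left-to-right scan of the text that does naive multi-pattern matching: at each position a first-character dispatch table yields the candidate keywords, each newly matched keyword adds its signed weight to one accumulator, and the sign of the accumulator gives the label.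
import Mathlib
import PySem

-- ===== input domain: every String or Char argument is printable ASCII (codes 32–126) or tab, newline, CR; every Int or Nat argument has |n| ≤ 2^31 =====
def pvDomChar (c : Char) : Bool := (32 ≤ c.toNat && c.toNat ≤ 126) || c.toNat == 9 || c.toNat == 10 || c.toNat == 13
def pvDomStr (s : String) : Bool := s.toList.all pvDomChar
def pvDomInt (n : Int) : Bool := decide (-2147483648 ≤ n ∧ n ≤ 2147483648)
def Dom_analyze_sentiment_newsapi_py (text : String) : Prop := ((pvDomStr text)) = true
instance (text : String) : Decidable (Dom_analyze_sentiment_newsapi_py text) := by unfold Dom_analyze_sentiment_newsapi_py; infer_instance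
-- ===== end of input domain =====

-- B replaces A's per-keyword substring tests by a single left-to-right scan of the text
-- (naive multi-pattern matching with a first-character dispatch table and one signed score).

-- ===== PORT A =====
def pvPosKws : List String :=
  ["growth", "gain", "strong", "beat", "above", "rally", "surge", "bull"]
def pvNegKws : List String :=
  ["fall", "decline", "weakness", "miss", "below", "crash", "bear", "drop"]

def analyze_sentiment_newsapi_py (text : String) : String :=
  let text_lower := PySem.Str.lower text
  let pos_count : Int :=
    pvPosKws.foldl (fun acc kw => if PySem.Str.isIn kw text_lower then acc + 1 else acc) 0
  let neg_count : Int :=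
    pvNegKws.foldl (fun acc kw => if PySem.Str.isIn kw text_lower then acc + 1 else acc) 0
  if pos_count > neg_count then "POSITIVE"
  else if neg_count > pos_count then "NEGATIVE"
  else "NEUTRAL"

-- ===== PORT B =====
-- the first-character dispatch table of Source B (dict literal keyed by the keyword's first character)
def pvTableDict : PySem.Dict Char (List (String × Int)) :=
  PySem.Dict.ofList
    [('g', [("growth", 1), ("gain", 1)]),
     ('s', [("strong", 1), ("surge", 1)]),
     ('b', [("beat", 1), ("bull", 1), ("below", -1), ("bear", -1)]),
     ('a', [("above", 1)]),
     ('r', [("rally", 1)]),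
     ('f', [("fall", -1)]),
     ('d', [("decline", -1), ("drop", -1)]),
     ('w', [("weakness", -1)]),
     ('m', [("miss", -1)]),
     ('c', [("crash", -1)])]

-- body of Source B's outer loop: 'for kw, w in table.get(c, []): if kw not in seen and t.startswith(kw, i): …'
-- 't.startswith(kw, i)' is ported by hand as a prefix test on t dropped at i
-- (exact here: enumerate supplies indices 0 ≤ i < len t)
def pvScan (tl : List Char) (st : PySem.Set String × Int) (p : Int × Char) : PySem.Set String × Int :=
  (pvTableDict.getD p.2 []).foldl
    (fun st2 q =>
      if !(PySem.Set.contains st2.1 q.1) && PySem.Chars.startswith (tl.drop p.1.toNat) q.1.toList then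
        (PySem.Set.add st2.1 q.1, st2.2 + q.2)
      else st2) st

def analyze_sentiment_newsapi_py_alt (text : String) : String :=
  let tl := PySem.Chars.lower text.toList
  let st := (PySem.List.enumerate tl 0).foldl (pvScan tl) (PySem.Set.empty, 0)
  if st.2 > 0 then "POSITIVE" else if st.2 < 0 then "NEGATIVE" else "NEUTRAL"

-- ===== PRECONDITION & SPEC =====
def Spec_analyze_sentiment_newsapi_py (text : String) (out : String) : Prop := out = analyze_sentiment_newsapi_py_alt text
instance (text : String) (out : String) : Decidable (Spec_analyze_sentiment_newsapi_py text out) := by unfold Spec_analyze_sentiment_newsapi_py; infer_instance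

-- ===== CLAIM (what is proved, stated in full; the proofs are below) =====
def Claim_equal_analyze_sentiment_newsapi_py : Prop := ∀ (text : String), Dom_analyze_sentiment_newsapi_py text → Spec_analyze_sentiment_newsapi_py text (analyze_sentiment_newsapi_py text)

-- ===== LEMMAS AND PROOFS =====

-- the 16 (keyword, weight) pairs in A's order
def pvAllPairs : List (String × Int) :=
  pvPosKws.map (fun k => (k, (1 : Int))) ++ pvNegKws.map (fun k => (k, (-1 : Int)))

-- the body of Source B's INNER loop, at the suffix d = t[i:] of the scanned text
def pvInnerStep (d : List Char) (st2 : PySem.Set String × Int) (q : String × Int) :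
    PySem.Set String × Int :=
  if !(PySem.Set.contains st2.1 q.1) && PySem.Chars.startswith d q.1.toList then
    (PySem.Set.add st2.1 q.1, st2.2 + q.2)
  else st2

theorem pvScan_eq (tl : List Char) (st : PySem.Set String × Int) (p : Int × Char) :
    pvScan tl st p = (pvTableDict.getD p.2 []).foldl (pvInnerStep (tl.drop p.1.toNat)) st := rfl

theorem pv_keys_nodup : (pvAllPairs.map Prod.fst).Nodup := by decide

theorem pv_kws_nonempty : ∀ x ∈ pvAllPairs.map Prod.fst, x.toList ≠ [] := by decide

-- each dispatch bucket is exactly the keywords of pvAllPairs whose first character is c, in order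
theorem pvBucket_eq (c : Char) :
    pvTableDict.getD c [] = pvAllPairs.filter (fun q => q.1.toList.head? == some c) := by
  by_cases h1 : c = 'g'; · subst h1; rfl
  by_cases h2 : c = 's'; · subst h2; rfl
  by_cases h3 : c = 'b'; · subst h3; rfl
  by_cases h4 : c = 'a'; · subst h4; rfl
  by_cases h5 : c = 'r'; · subst h5; rfl
  by_cases h6 : c = 'f'; · subst h6; rfl
  by_cases h7 : c = 'd'; · subst h7; rfl
  by_cases h8 : c = 'w'; · subst h8; rfl
  by_cases h9 : c = 'm'; · subst h9; rfl
  by_cases h10 : c = 'c'; · subst h10; rfl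
  have hitems : pvTableDict.items =
      [('g', [("growth", 1), ("gain", 1)]),
       ('s', [("strong", 1), ("surge", 1)]),
       ('b', [("beat", 1), ("bull", 1), ("below", -1), ("bear", -1)]),
       ('a', [("above", 1)]),
       ('r', [("rally", 1)]),
       ('f', [("fall", -1)]),
       ('d', [("decline", -1), ("drop", -1)]),
       ('w', [("weakness", -1)]),
       ('m', [("miss", -1)]),
       ('c', [("crash", -1)])] := by rfl
  have hleft : pvTableDict.getD c [] = [] := by
    simp only [PySem.Dict.getD, PySem.Dict.get?, hitems]
    rw [List.find?_eq_none.mpr]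
    · rfl
    · intro p hp
      fin_cases hp <;>
        simp only [beq_iff_eq] <;>
        exact fun h => (by first
          | exact h1 h.symm | exact h2 h.symm | exact h3 h.symm | exact h4 h.symm
          | exact h5 h.symm | exact h6 h.symm | exact h7 h.symm | exact h8 h.symm
          | exact h9 h.symm | exact h10 h.symm)
  have hright : pvAllPairs.filter (fun q => q.1.toList.head? == some c) = [] := by
    rw [List.filter_eq_nil_iff]
    intro q hq
    fin_cases hq <;>
      simp only [beq_iff_eq] <;>
      intro h <;>
      first
        | exact h1 (Option.some.inj h).symm | exact h2 (Option.some.inj h).symm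
        | exact h3 (Option.some.inj h).symm | exact h4 (Option.some.inj h).symm
        | exact h5 (Option.some.inj h).symm | exact h6 (Option.some.inj h).symm
        | exact h7 (Option.some.inj h).symm | exact h8 (Option.some.inj h).symm
        | exact h9 (Option.some.inj h).symm | exact h10 (Option.some.inj h).symm
  rw [hleft, hright]

-- invariant of Source B's inner loop: the set gains exactly the keywords of the bucket that
-- match at the current position, the score gains their weights (once each)
theorem pv_inner (d : List Char) :
    ∀ (l : List (String × Int)) (seen : PySem.Set String) (score : Int),
      (l.map Prod.fst).Nodup →
      (∀ x, x ∈ (l.foldl (pvInnerStep d) (seen, score)).1 ↔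
          x ∈ seen ∨ (x ∈ l.map Prod.fst ∧ PySem.Chars.startswith d x.toList = true)) ∧
      (l.foldl (pvInnerStep d) (seen, score)).2 =
        score + (l.map (fun q =>
          if q.1 ∉ seen ∧ PySem.Chars.startswith d q.1.toList = true then q.2 else 0)).sum := by
  intro l
  induction l with
  | nil => intro seen score _; simp
  | cons q l ih =>
    intro seen score hnd
    have hnd2 : (l.map Prod.fst).Nodup := (List.nodup_cons.mp (by simpa using hnd)).2
    have hqnot : q.1 ∉ l.map Prod.fst := (List.nodup_cons.mp (by simpa using hnd)).1
    simp only [List.foldl_cons, List.map_cons]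
    by_cases hs : PySem.Chars.startswith d q.1.toList = true
    · by_cases hm : q.1 ∈ seen
      · have hstep : pvInnerStep d (seen, score) q = (seen, score) := by
          have hcond : (!(PySem.Set.contains seen q.1)
              && PySem.Chars.startswith d q.1.toList) = false := by
            simp [pysem, hm]
          unfold pvInnerStep
          rw [hcond]
          simp
        rw [hstep]
        obtain ⟨ihm, ihs⟩ := ih seen score hnd2
        refine ⟨fun x => ?_, ?_⟩
        · rw [ihm x]
          simp only [List.mem_cons]
          constructor
          · rintro (h | ⟨hx, hsw⟩)
            · exact Or.inl h
            · exact Or.inr ⟨Or.inr hx, hsw⟩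
          · rintro (h | ⟨(hx | hx), hsw⟩)
            · exact Or.inl h
            · exact Or.inl (hx ▸ hm)
            · exact Or.inr ⟨hx, hsw⟩
        · rw [ihs]
          simp only [List.map_cons, List.sum_cons]
          rw [if_neg (fun h => h.1 hm)]
          ring
      · have hstep : pvInnerStep d (seen, score) q = (PySem.Set.add seen q.1, score + q.2) := by
          have hcond : (!(PySem.Set.contains seen q.1)
              && PySem.Chars.startswith d q.1.toList) = true := by
            simp [pysem, hm, hs]
          unfold pvInnerStep
          rw [hcond]
          simp
        rw [hstep]
        obtain ⟨ihm, ihs⟩ := ih (PySem.Set.add seen q.1) (score + q.2) hnd2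
        refine ⟨fun x => ?_, ?_⟩
        · rw [ihm x, PySem.Set.mem_add]
          simp only [List.mem_cons]
          constructor
          · rintro ((h | hx) | ⟨hx, hsw⟩)
            · exact Or.inl h
            · exact Or.inr ⟨Or.inl hx, hx ▸ hs⟩
            · exact Or.inr ⟨Or.inr hx, hsw⟩
          · rintro (h | ⟨(hx | hx), hsw⟩)
            · exact Or.inl (Or.inl h)
            · exact Or.inl (Or.inr hx)
            · exact Or.inr ⟨hx, hsw⟩
        · rw [ihs]
          have hcong : l.map (fun q' =>
                if q'.1 ∉ PySem.Set.add seen q.1 ∧ PySem.Chars.startswith d q'.1.toList = true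
                then q'.2 else 0)
              = l.map (fun q' =>
                if q'.1 ∉ seen ∧ PySem.Chars.startswith d q'.1.toList = true then q'.2 else 0) := by
            apply List.map_congr_left
            intro a ha
            have hne : a.1 ≠ q.1 := fun h => hqnot (h ▸ List.mem_map_of_mem ha)
            have hms : a.1 ∈ PySem.Set.add seen q.1 ↔ a.1 ∈ seen := by
              rw [PySem.Set.mem_add]; simp [hne]
            simp only [hms]
          rw [hcong]
          simp only [List.map_cons, List.sum_cons]
          have hgp : q.1 ∉ seen ∧ PySem.Chars.startswith d q.1.toList = true := ⟨hm, hs⟩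
          rw [if_pos hgp]
          ring
    · have hstep : pvInnerStep d (seen, score) q = (seen, score) := by
        have hcond : (!(PySem.Set.contains seen q.1)
            && PySem.Chars.startswith d q.1.toList) = false := by
          simp [hs]
        unfold pvInnerStep
        rw [hcond]
        simp
      rw [hstep]
      obtain ⟨ihm, ihs⟩ := ih seen score hnd2
      refine ⟨fun x => ?_, ?_⟩
      · rw [ihm x]
        simp only [List.mem_cons]
        constructor
        · rintro (h | ⟨hx, hsw⟩)
          · exact Or.inl h
          · exact Or.inr ⟨Or.inr hx, hsw⟩
        · rintro (h | ⟨(hx | hx), hsw⟩)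
          · exact Or.inl h
          · exact absurd (hx ▸ hsw) hs
          · exact Or.inr ⟨hx, hsw⟩
      · rw [ihs]
        simp only [List.map_cons, List.sum_cons]
        have : ¬ (q.1 ∉ seen ∧ PySem.Chars.startswith d q.1.toList = true) := fun h => hs h.2
        rw [if_neg this]
        ring

-- summing a filtered list is summing with a guard
theorem pv_sum_map_filter (l : List (String × Int)) (p : String × Int → Bool)
    (f : String × Int → Int) :
    ((l.filter p).map f).sum = (l.map (fun q => if p q then f q else 0)).sum := by
  induction l with
  | nil => rfl
  | cons q l ih =>
    by_cases h : p q <;> simp [List.filter_cons, h, ih]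

-- a weighted indicator sum is weight times a count
theorem pv_sum_ite (l : List String) (p : String → Prop) [DecidablePred p] (w : Int) :
    (l.map (fun k => if p k then w else 0)).sum = w * (l.countP (fun k => decide (p k)) : Int) := by
  induction l with
  | nil => simp
  | cons k l ih =>
    by_cases h : p k <;> simp [List.countP_cons, h, ih] <;> ring

-- invariant of Source B's outer loop, over the suffix l = t[k:] of the scanned text:
-- the set ends up holding exactly the keywords occurring in l, the score their net weight
theorem pv_outer (tl : List Char) :
    ∀ (l : List Char) (k : Nat), tl.drop k = l →
    ∀ (seen : PySem.Set String) (score : Int),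
      (∀ x, x ∈ ((PySem.List.enumerate l (k : Int)).foldl (pvScan tl) (seen, score)).1 ↔
          x ∈ seen ∨ (x ∈ pvAllPairs.map Prod.fst ∧ x.toList <:+: l)) ∧
      ((PySem.List.enumerate l (k : Int)).foldl (pvScan tl) (seen, score)).2 =
        score + (pvAllPairs.map (fun q =>
          if q.1 ∉ seen ∧ q.1.toList <:+: l then q.2 else 0)).sum := by
  intro l
  induction l with
  | nil =>
    intro k hk seen score
    simp only [PySem.List.enumerate_nil, List.foldl_nil]
    refine ⟨fun x => ?_, ?_⟩
    · constructor
      · exact Or.inl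
      · rintro (h | ⟨hx, hinf⟩)
        · exact h
        · exact absurd (List.sublist_nil.mp hinf.sublist) (pv_kws_nonempty x hx)
    · have hz : (pvAllPairs.map (fun q =>
          if q.1 ∉ seen ∧ q.1.toList <:+: ([] : List Char) then q.2 else 0)).sum = 0 := by
        apply List.sum_eq_zero
        intro y hy
        obtain ⟨q, hq, rfl⟩ := List.mem_map.mp hy
        rw [if_neg]
        rintro ⟨-, hinf⟩
        exact pv_kws_nonempty q.1 (List.mem_map_of_mem hq) (List.sublist_nil.mp hinf.sublist)
      rw [hz]; ring
  | cons c l2 ih =>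
    intro k hk seen score
    have hk2 : tl.drop (k + 1) = l2 := by
      rw [← List.tail_drop, hk]
      rfl
    have hscan : pvScan tl (seen, score) ((k : Int), c)
        = (pvTableDict.getD c []).foldl (pvInnerStep (c :: l2)) (seen, score) := by
      rw [pvScan_eq]
      simp only [Int.toNat_natCast, hk]
    have hbnd : ((pvTableDict.getD c []).map Prod.fst).Nodup := by
      rw [pvBucket_eq]
      exact pv_keys_nodup.sublist (List.Sublist.map Prod.fst List.filter_sublist)
    obtain ⟨im, isc⟩ := pv_inner (c :: l2) (pvTableDict.getD c []) seen score hbnd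
    -- the state after position k
    set s1 := (pvTableDict.getD c []).foldl (pvInnerStep (c :: l2)) (seen, score) with hs1
    obtain ⟨ohm, ohs⟩ := ih (k + 1) hk2 s1.1 s1.2
    have hcast : ((k : Int) + 1) = ((k + 1 : Nat) : Int) := by push_cast; ring
    have hfold : (PySem.List.enumerate (c :: l2) (k : Int)).foldl (pvScan tl) (seen, score)
        = (PySem.List.enumerate l2 ((k + 1 : Nat) : Int)).foldl (pvScan tl) (s1.1, s1.2) := by
      rw [PySem.List.enumerate_cons, List.foldl_cons, hscan, hcast, Prod.mk.eta]
    -- bucket membership in terms of pvAllPairs, for matching keywords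
    have hmatch : ∀ x, (x ∈ (pvTableDict.getD c []).map Prod.fst
          ∧ PySem.Chars.startswith (c :: l2) x.toList = true)
        ↔ (x ∈ pvAllPairs.map Prod.fst ∧ x.toList <+: c :: l2) := by
      intro x
      rw [PySem.Chars.startswith_iff]
      constructor
      · rintro ⟨hxb, hpre⟩
        obtain ⟨q, hq, rfl⟩ := List.mem_map.mp hxb
        rw [pvBucket_eq] at hq
        exact ⟨List.mem_map_of_mem (List.mem_of_mem_filter hq), hpre⟩
      · rintro ⟨hxp, hpre⟩
        refine ⟨?_, hpre⟩
        obtain ⟨q, hq, rfl⟩ := List.mem_map.mp hxp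
        have hne : q.1.toList ≠ [] := pv_kws_nonempty q.1 (List.mem_map_of_mem hq)
        have hhead : q.1.toList.head? = some c := by
          obtain ⟨t, ht⟩ := hpre
          cases hql : q.1.toList with
          | nil => exact absurd hql hne
          | cons a as =>
            rw [hql] at ht
            simp only [List.cons_append] at ht
            injection ht with h1 _
            rw [h1]
            rfl
        apply List.mem_map_of_mem
        rw [pvBucket_eq]
        exact List.mem_filter.mpr ⟨hq, by rw [hhead]; simp⟩
    have hm1 : ∀ x, x ∈ s1.1 ↔ x ∈ seen ∨ (x ∈ pvAllPairs.map Prod.fst ∧ x.toList <+: c :: l2) := by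
      intro x
      rw [im x, hmatch x]
    refine ⟨fun x => ?_, ?_⟩
    · rw [hfold, ohm x, hm1 x]
      constructor
      · rintro ((h | ⟨hp, hpre⟩) | ⟨hp, hinf⟩)
        · exact Or.inl h
        · exact Or.inr ⟨hp, List.infix_cons_iff.mpr (Or.inl hpre)⟩
        · exact Or.inr ⟨hp, List.infix_cons_iff.mpr (Or.inr hinf)⟩
      · rintro (h | ⟨hp, hinf⟩)
        · exact Or.inl (Or.inl h)
        · rcases List.infix_cons_iff.mp hinf with hpre | hinf2
          · exact Or.inl (Or.inr ⟨hp, hpre⟩)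
          · exact Or.inr ⟨hp, hinf2⟩
    · rw [hfold, ohs, isc]
      rw [pvBucket_eq, pv_sum_map_filter]
      have hcong : pvAllPairs.map (fun q =>
            (if (q.1.toList.head? == some c) = true then
              (if q.1 ∉ seen ∧ PySem.Chars.startswith (c :: l2) q.1.toList = true then q.2 else 0)
             else 0)
            + (if q.1 ∉ s1.1 ∧ q.1.toList <:+: l2 then q.2 else 0))
          = pvAllPairs.map (fun q =>
            if q.1 ∉ seen ∧ q.1.toList <:+: c :: l2 then q.2 else 0) := by
        apply List.map_congr_left
        intro q hq
        have hkey : q.1 ∈ pvAllPairs.map Prod.fst := List.mem_map_of_mem hq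
        have hsw : PySem.Chars.startswith (c :: l2) q.1.toList = true ↔ q.1.toList <+: c :: l2 :=
          PySem.Chars.startswith_iff _ _
        have hs1m : q.1 ∈ s1.1 ↔ q.1 ∈ seen ∨ q.1.toList <+: c :: l2 := by
          rw [hm1 q.1]
          constructor
          · rintro (h | ⟨-, hpre⟩)
            · exact Or.inl h
            · exact Or.inr hpre
          · rintro (h | hpre)
            · exact Or.inl h
            · exact Or.inr ⟨hkey, hpre⟩
        have hheadpre : q.1.toList <+: c :: l2 → (q.1.toList.head? == some c) = true := by
          intro hpre
          have hne : q.1.toList ≠ [] := pv_kws_nonempty q.1 hkey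
          obtain ⟨t, ht⟩ := hpre
          cases hql : q.1.toList with
          | nil => exact absurd hql hne
          | cons a as =>
            rw [hql] at ht
            simp only [List.cons_append] at ht
            injection ht with h1 _
            rw [h1]
            simp
        by_cases hA : q.1 ∈ seen
        · have h1 : q.1 ∈ s1.1 := hs1m.mpr (Or.inl hA)
          simp [hA, h1]
        · by_cases hP : q.1.toList <+: c :: l2
          · have h1 : q.1 ∈ s1.1 := hs1m.mpr (Or.inr hP)
            have hinf : q.1.toList <:+: c :: l2 := List.infix_cons_iff.mpr (Or.inl hP)
            have hg1 : ¬ (q.1 ∉ s1.1 ∧ q.1.toList <:+: l2) := fun h => h.1 h1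
            have hg2 : q.1 ∉ seen ∧ q.1.toList <:+: c :: l2 := ⟨hA, hinf⟩
            have hg3 : q.1 ∉ seen ∧ PySem.Chars.startswith (c :: l2) q.1.toList = true :=
              ⟨hA, hsw.mpr hP⟩
            rw [if_pos (hheadpre hP), if_pos hg3, if_neg hg1, if_pos hg2]
            ring
          · have h1 : q.1 ∉ s1.1 := fun h => (hs1m.mp h).elim hA hP
            have hnsw : ¬ (q.1 ∉ seen ∧ PySem.Chars.startswith (c :: l2) q.1.toList = true) :=
              fun h => hP (hsw.mp h.2)
            by_cases hR : q.1.toList <:+: l2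
            · have hinf : q.1.toList <:+: c :: l2 := List.infix_cons_iff.mpr (Or.inr hR)
              have hg1 : q.1 ∉ s1.1 ∧ q.1.toList <:+: l2 := ⟨h1, hR⟩
              have hg2 : q.1 ∉ seen ∧ q.1.toList <:+: c :: l2 := ⟨hA, hinf⟩
              rw [if_pos hg1, if_pos hg2]
              by_cases hH : (q.1.toList.head? == some c) = true
              · rw [if_pos hH, if_neg hnsw]; ring
              · rw [if_neg hH]; ring
            · have hninf : ¬ q.1.toList <:+: c :: l2 := by
                intro h
                rcases List.infix_cons_iff.mp h with h' | h'
                · exact hP h'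
                · exact hR h'
              have hg1 : ¬ (q.1 ∉ s1.1 ∧ q.1.toList <:+: l2) := fun h => hR h.2
              have hg2 : ¬ (q.1 ∉ seen ∧ q.1.toList <:+: c :: l2) := fun h => hninf h.2
              rw [if_neg hg1, if_neg hg2]
              by_cases hH : (q.1.toList.head? == some c) = true
              · rw [if_pos hH, if_neg hnsw]; ring
              · rw [if_neg hH]; ring
      have key : (pvAllPairs.map (fun q =>
            (if (q.1.toList.head? == some c) = true then
              (if q.1 ∉ seen ∧ PySem.Chars.startswith (c :: l2) q.1.toList = true then q.2 else 0)
             else 0))).sum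
          + (pvAllPairs.map (fun q => if q.1 ∉ s1.1 ∧ q.1.toList <:+: l2 then q.2 else 0)).sum
          = (pvAllPairs.map (fun q =>
            if q.1 ∉ seen ∧ q.1.toList <:+: c :: l2 then q.2 else 0)).sum := by
        rw [← PySem.List.sum_map_add_int, hcong]
      omega

-- the shape of A's counting folds
theorem pv_foldl_count (p : String → Bool) :
    ∀ (l : List String) (n : Int),
      l.foldl (fun acc kw => if p kw then acc + 1 else acc) n = n + (l.countP p : Int) := by
  intro l
  induction l with
  | nil => intro n; simp
  | cons k l ih =>
    intro n
    by_cases h : p k <;> simp [List.countP_cons, h, ih] <;> ring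

-- ===== VERDICT (by name: the statement is the Claim_ definition above) =====
theorem analyze_sentiment_newsapi_py_spec : Claim_equal_analyze_sentiment_newsapi_py := by
  intro text _
  unfold Spec_analyze_sentiment_newsapi_py
  unfold analyze_sentiment_newsapi_py analyze_sentiment_newsapi_py_alt
  simp only []
  obtain ⟨-, hsc⟩ := pv_outer (PySem.Chars.lower text.toList) (PySem.Chars.lower text.toList) 0
    (by simp) PySem.Set.empty 0
  simp only [Nat.cast_zero] at hsc
  rw [hsc]
  have hguard : pvAllPairs.map (fun q =>
        if q.1 ∉ PySem.Set.empty ∧ q.1.toList <:+: PySem.Chars.lower text.toList then q.2 else 0)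
      = pvAllPairs.map (fun q =>
        if q.1.toList <:+: PySem.Chars.lower text.toList then q.2 else 0) := by
    apply List.map_congr_left
    intro q _
    have : (q.1 ∉ PySem.Set.empty ∧ q.1.toList <:+: PySem.Chars.lower text.toList)
        ↔ q.1.toList <:+: PySem.Chars.lower text.toList := by
      simp [PySem.Set.empty]
    simp only [this]
  rw [hguard]
  have hlow : (PySem.Str.lower text).toList = PySem.Chars.lower text.toList := by simp
  have hbr : ∀ kw : String, PySem.Str.isIn kw (PySem.Str.lower text)
      = decide (kw.toList <:+: PySem.Chars.lower text.toList) := by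
    intro kw
    by_cases h : kw.toList <:+: PySem.Chars.lower text.toList
    · simp only [h, decide_true]
      exact (PySem.Str.isIn_iff_infix _ _).mpr (by rw [hlow]; exact h)
    · simp only [h, decide_false]
      rw [← Bool.not_eq_true, PySem.Str.isIn_iff_infix, hlow]
      exact h
  have hsplit : (pvAllPairs.map (fun q =>
        if q.1.toList <:+: PySem.Chars.lower text.toList then q.2 else 0)).sum
      = 1 * (pvPosKws.countP (fun k => decide (k.toList <:+: PySem.Chars.lower text.toList)) : Int)
        + (-1) * (pvNegKws.countP (fun k => decide (k.toList <:+: PySem.Chars.lower text.toList)) : Int) := by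
    unfold pvAllPairs
    rw [List.map_append, List.sum_append, List.map_map, List.map_map]
    rw [show ((fun q : String × Int =>
          if q.1.toList <:+: PySem.Chars.lower text.toList then q.2 else 0)
            ∘ (fun k : String => (k, (1 : Int))))
        = (fun k : String =>
            if k.toList <:+: PySem.Chars.lower text.toList then (1 : Int) else 0) from rfl]
    rw [show ((fun q : String × Int =>
          if q.1.toList <:+: PySem.Chars.lower text.toList then q.2 else 0)
            ∘ (fun k : String => (k, (-1 : Int))))
        = (fun k : String =>
            if k.toList <:+: PySem.Chars.lower text.toList then (-1 : Int) else 0) from rfl]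
    rw [pv_sum_ite pvPosKws (fun k => k.toList <:+: PySem.Chars.lower text.toList) 1,
        pv_sum_ite pvNegKws (fun k => k.toList <:+: PySem.Chars.lower text.toList) (-1)]
  rw [hsplit]
  rw [pv_foldl_count (fun kw => PySem.Str.isIn kw (PySem.Str.lower text)) pvPosKws 0,
      pv_foldl_count (fun kw => PySem.Str.isIn kw (PySem.Str.lower text)) pvNegKws 0]
  have hc1 : pvPosKws.countP (fun kw => PySem.Str.isIn kw (PySem.Str.lower text))
      = pvPosKws.countP (fun k => decide (k.toList <:+: PySem.Chars.lower text.toList)) :=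
    List.countP_congr (fun kw _ => by rw [hbr kw])
  have hc2 : pvNegKws.countP (fun kw => PySem.Str.isIn kw (PySem.Str.lower text))
      = pvNegKws.countP (fun k => decide (k.toList <:+: PySem.Chars.lower text.toList)) :=
    List.countP_congr (fun kw _ => by rw [hbr kw])
  rw [hc1, hc2]
  split_ifs <;> first | rfl | omega
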